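-- pv_equiv track=rewrite | github.com/Mjk-123/Character-calculator | character.py | character_M
-- ===== SOURCE A (Python) =====
-- from functools import lru_cache
--
-- def character_M(partition, cycle_lengths):
--     """
--     Compute χ_{M^λ}(σ): number of λ-tabloids fixed by a permutation with given cycle lengths.
--     Uses backtracking to assign each cycle to a row of the partition.
--     """
--     rows = len(partition)
--
--     @lru_cache(None)
--     def backtrack(idx, remaining):
--         if idx == len(cycle_lengths):
--             return 1 if all(r == 0 for r in remaining) else 0
--         total = 0
--         length = cycle_lengths[idx]
--         for i in range(rows):
--             if remaining[i] >= length: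
--                 new_rem = list(remaining)
--                 new_rem[i] -= length
--                 total += backtrack(idx + 1, tuple(new_rem))
--         return total
--
--     return backtrack(0, tuple(partition))
-- ===== SOURCE B (Python) =====
-- def character_M(partition, cycle_lengths):
--     """Forward bottom-up DP over remaining-capacity states instead of recursive backtracking."""
--     states = {tuple(partition): 1}
--     for length in cycle_lengths:
--         new_states = {}
--         for remaining, count in states.items():
--             for i in range(len(remaining)):
--                 if remaining[i] >= length:
--                     new_rem = list(remaining)
--                     new_rem[i] -= length
--                     key = tuple(new_rem)
--                     new_states[key] = new_states.get(key, 0) + count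
--         states = new_states
--     return states.get((0,) * len(partition), 0)
-- ===== Notes on version B (the rewrite author's own statement) =====
-- stated objective: alternative
-- what changed: Replaces A's top-down recursive lru_cache backtracking over (cycle index, remaining tuple) with a forward bottom-up dictionary DP: states map remaining-capacity tuples to counts, each cycle length redistributes counts over the rows, and the answer is the count of the all-zeros state.
import Mathlib
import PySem

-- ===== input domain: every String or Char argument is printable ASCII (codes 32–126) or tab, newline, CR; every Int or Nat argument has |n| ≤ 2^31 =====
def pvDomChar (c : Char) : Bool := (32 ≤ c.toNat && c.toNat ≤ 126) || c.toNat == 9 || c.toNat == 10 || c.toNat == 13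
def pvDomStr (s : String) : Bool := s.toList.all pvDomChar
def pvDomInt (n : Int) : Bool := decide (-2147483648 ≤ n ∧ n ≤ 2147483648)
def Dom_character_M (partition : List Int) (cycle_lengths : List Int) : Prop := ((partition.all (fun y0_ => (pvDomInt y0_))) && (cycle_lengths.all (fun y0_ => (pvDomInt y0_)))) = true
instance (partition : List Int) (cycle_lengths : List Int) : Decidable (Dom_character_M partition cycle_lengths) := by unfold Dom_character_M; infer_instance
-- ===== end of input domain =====

-- B replaces A's recursive memoized backtracking by a forward bottom-up DP over a dictionary of
-- remaining-capacity states; same return value, different decomposition (the lru_cache of A is a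
-- value-preserving cache and is omitted in A's port).

-- ===== PORT A =====
-- backtrack(idx, remaining) of A, recursion on the suffix of cycle_lengths from idx
def pvBacktrack (rows : Int) : List Int → List Int → Int
  | [], remaining => if remaining.all (fun r => r == 0) then 1 else 0
  | length :: rest, remaining =>
      (PySem.List.pyRange 0 rows 1).foldl
        (fun total i =>
          if length ≤ PySem.List.pyGetD remaining i 0 then
            total + pvBacktrack rows rest
              (remaining.set i.toNat (PySem.List.pyGetD remaining i 0 - length))
          else total) 0

def character_M (partition : List Int) (cycle_lengths : List Int) : Int :=
  pvBacktrack (partition.length : Int) cycle_lengths partition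

-- ===== PORT B =====
-- one pass of B's outer loop: distribute every state's count over the rows that can take `length`
def pvStep (length : Int) (states : PySem.Dict (List Int) Int) : PySem.Dict (List Int) Int :=
  states.items.foldl
    (fun new_states p =>
      (PySem.List.pyRange 0 (p.1.length : Int) 1).foldl
        (fun new_states i =>
          if length ≤ PySem.List.pyGetD p.1 i 0 then
            let key := p.1.set i.toNat (PySem.List.pyGetD p.1 i 0 - length)
            new_states.insert key (new_states.getD key 0 + p.2)
          else new_states) new_states)
    PySem.Dict.empty

def character_M_alt (partition : List Int) (cycle_lengths : List Int) : Int :=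
  (cycle_lengths.foldl (fun states length => pvStep length states)
      ((PySem.Dict.empty : PySem.Dict (List Int) Int).insert partition 1)).getD
    (List.replicate partition.length (0 : Int)) 0

-- ===== PRECONDITION & SPEC =====
def Spec_character_M (partition : List Int) (cycle_lengths : List Int) (out : Int) : Prop := out = character_M_alt partition cycle_lengths
instance (partition : List Int) (cycle_lengths : List Int) (out : Int) : Decidable (Spec_character_M partition cycle_lengths out) := by unfold Spec_character_M; infer_instance

-- ===== CLAIM (what is proved, stated in full; the proofs are below) =====
def Claim_equal_character_M : Prop := ∀ (partition : List Int) (cycle_lengths : List Int), Dom_character_M partition cycle_lengths → Spec_character_M partition cycle_lengths (character_M partition cycle_lengths)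

-- ===== LEMMAS AND PROOFS =====

-- weighted sum of an association list against a valuation f of the keys
def pvW (f : List Int → Int) (L : List (List Int × Int)) : Int :=
  (L.map (fun p => p.2 * f p.1)).sum

-- dict invariant maintained through B's loops: unique keys, all of length `rows`
def pvInv (rows : Nat) (d : PySem.Dict (List Int) Int) : Prop :=
  d.keys.Nodup ∧ ∀ p ∈ d.items, p.1.length = rows

lemma pv_items_empty : (PySem.Dict.empty : PySem.Dict (List Int) Int).items = [] :=
  List.map_eq_nil_iff.mp
    (by simpa only [PySem.Dict.keys] using (PySem.Dict.keys_empty (κ := List Int) (ν := Int)))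

lemma pv_bump_sum (L : List (List Int × Int)) (k : List Int) (w v : Int) (f : List Int → Int)
    (hnd : (L.map Prod.fst).Nodup) (hmem : (k, w) ∈ L) :
    ((L.map (fun p => if p.1 == k then (k, w + v) else p)).map (fun p => p.2 * f p.1)).sum
      = (L.map (fun p => p.2 * f p.1)).sum + v * f k := by
  induction L with
  | nil => simp at hmem
  | cons p L ih =>
      simp only [List.map_cons, List.nodup_cons, List.mem_map] at hnd
      rcases List.mem_cons.mp hmem with h | h
      · -- head is the matching entry
        obtain rfl : p = (k, w) := h.symm
        have hrest : ∀ q ∈ L, (q.1 == k) = false := by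
          intro q hq
          by_contra hq'
          simp only [Bool.not_eq_false, beq_iff_eq] at hq'
          exact hnd.1 ⟨q, hq, hq'⟩
        have hmapid : L.map (fun p => if (p.1 == k) = true then (k, w + v) else p) = L :=
          (List.map_congr_left (g := id) (fun q hq => by simp [hrest q hq])).trans (List.map_id L)
        simp only [List.map_cons, hmapid, List.sum_cons]
        simp only [beq_self_eq_true, if_true]
        ring
      · -- matching entry in the tail; head key is different
        have hpk : (p.1 == k) = false := by
          by_contra hq'
          simp only [Bool.not_eq_false, beq_iff_eq] at hq'
          exact hnd.1 ⟨(k, w), h, by simp [hq']⟩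
        simp only [List.map_cons, hpk, Bool.false_eq_true, if_false, List.sum_cons]
        rw [ih hnd.2 h]
        ring

lemma pv_W_insert_add (d : PySem.Dict (List Int) Int) (k : List Int) (v : Int)
    (f : List Int → Int) (hnd : d.keys.Nodup) :
    pvW f (d.insert k (d.getD k 0 + v)).items = pvW f d.items + v * f k := by
  by_cases h : d.contains k = true
  · have hs : (d.get? k).isSome := by rw [← PySem.Dict.contains_eq_isSome_get?]; exact h
    obtain ⟨w, hw⟩ := Option.isSome_iff_exists.mp hs
    have hm : (k, w) ∈ d.items := PySem.Dict.mem_items_of_get?_eq_some _ hw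
    have hgd : d.getD k 0 = w := PySem.Dict.getD_of_get?_eq_some _ _ hw
    rw [PySem.Dict.items_insert_of_contains d _ h, hgd]
    have hnd' : (d.items.map Prod.fst).Nodup := by
      simpa only [PySem.Dict.keys] using hnd
    exact pv_bump_sum d.items k w v f hnd' hm
  · have h' : d.contains k = false := by simpa using h
    rw [PySem.Dict.items_insert_of_not_contains d _ h',
        PySem.Dict.getD_of_not_contains _ _ h']
    simp [pvW]

-- keys of (d.insert k v) are keys of d possibly extended by k
lemma pv_inv_insert (rows : Nat) (d : PySem.Dict (List Int) Int) (k : List Int) (v : Int)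
    (hInv : pvInv rows d) (hk : k.length = rows) : pvInv rows (d.insert k v) := by
  refine ⟨PySem.Dict.nodup_keys_insert _ _ _ hInv.1, ?_⟩
  intro p hp
  rcases (PySem.Dict.mem_items_insert _ _ _ _).mp hp with h | h
  · rw [h]; exact hk
  · exact hInv.2 p h.1

-- the inner `for i in range(...)` loop of B, over an arbitrary index list
lemma pv_inner_loop (is : List Int) (cond : Int → Prop) [DecidablePred cond]
    (key : Int → List Int) (v : Int) (rows : Nat) (hkey : ∀ i, (key i).length = rows)
    (f : List Int → Int) (ns : PySem.Dict (List Int) Int) (hInv : pvInv rows ns) :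
    pvInv rows (is.foldl (fun ns i => if cond i then ns.insert (key i) (ns.getD (key i) 0 + v) else ns) ns)
    ∧ pvW f (is.foldl (fun ns i => if cond i then ns.insert (key i) (ns.getD (key i) 0 + v) else ns) ns).items
      = pvW f ns.items + v * ((is.filter (fun i => decide (cond i))).map (fun i => f (key i))).sum := by
  induction is generalizing ns with
  | nil => exact ⟨hInv, by simp⟩
  | cons i is ih =>
      by_cases hc : cond i
      · have hInv' := pv_inv_insert rows ns (key i) (ns.getD (key i) 0 + v) hInv (hkey i)
        have := ih _ hInv'
        refine ⟨by simpa [hc] using this.1, ?_⟩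
        simp only [List.foldl_cons, List.filter_cons, decide_eq_true_eq, hc, if_pos, List.map_cons,
          List.sum_cons]
        rw [this.2, pv_W_insert_add ns (key i) v f hInv.1]
        ring
      · have := ih ns hInv
        refine ⟨by simpa [hc] using this.1, ?_⟩
        simp only [List.foldl_cons, List.filter_cons, decide_eq_true_eq, hc]
        simpa using this.2

-- a 0-started conditional-accumulation foldl is a filtered sum (shape of A's inner loop)
lemma pv_foldl_if_sum (is : List Int) (cond : Int → Prop) [DecidablePred cond]
    (g : Int → Int) (init : Int) :
    is.foldl (fun total i => if cond i then total + g i else total) init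
      = init + ((is.filter (fun i => decide (cond i))).map g).sum := by
  induction is generalizing init with
  | nil => simp
  | cons i is ih =>
      by_cases hc : cond i <;> simp [hc, ih, add_assoc]

-- one cycle: B's step advances the weighted sum by one level of A's recursion
lemma pv_step_W (length : Int) (rows : Nat) (rest : List Int)
    (d : PySem.Dict (List Int) Int) (hInv : pvInv rows d) :
    pvInv rows (pvStep length d)
    ∧ pvW (pvBacktrack (rows : Int) rest) (pvStep length d).items
      = pvW (pvBacktrack (rows : Int) (length :: rest)) d.items := by
  unfold pvStep
  have key_main :
      ∀ (L : List (List Int × Int)), (∀ p ∈ L, p.1.length = rows) →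
      ∀ (ns : PySem.Dict (List Int) Int), pvInv rows ns →
      pvInv rows (L.foldl (fun new_states p =>
          (PySem.List.pyRange 0 (p.1.length : Int) 1).foldl
            (fun new_states i =>
              if length ≤ PySem.List.pyGetD p.1 i 0 then
                let key := p.1.set i.toNat (PySem.List.pyGetD p.1 i 0 - length)
                new_states.insert key (new_states.getD key 0 + p.2)
              else new_states) new_states) ns)
      ∧ pvW (pvBacktrack (rows : Int) rest) (L.foldl (fun new_states p =>
          (PySem.List.pyRange 0 (p.1.length : Int) 1).foldl
            (fun new_states i =>
              if length ≤ PySem.List.pyGetD p.1 i 0 then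
                let key := p.1.set i.toNat (PySem.List.pyGetD p.1 i 0 - length)
                new_states.insert key (new_states.getD key 0 + p.2)
              else new_states) new_states) ns).items
        = pvW (pvBacktrack (rows : Int) rest) ns.items
          + pvW (pvBacktrack (rows : Int) (length :: rest)) L := by
    intro L
    induction L with
    | nil => intro _ ns h; exact ⟨h, by simp [pvW]⟩
    | cons p L ih =>
        intro hL ns hns
        have hp : p.1.length = rows := hL p (by simp)
        have hkey : ∀ i : Int, (p.1.set i.toNat (PySem.List.pyGetD p.1 i 0 - length)).length = rows := by
          intro i; simpa using hp
        have hin := pv_inner_loop (PySem.List.pyRange 0 (p.1.length : Int) 1)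
          (fun i => length ≤ PySem.List.pyGetD p.1 i 0)
          (fun i => p.1.set i.toNat (PySem.List.pyGetD p.1 i 0 - length)) p.2 rows hkey
          (pvBacktrack (rows : Int) rest) ns hns
        have hrec := ih (fun q hq => hL q (by simp [hq])) _ hin.1
        refine ⟨by simpa using hrec.1, ?_⟩
        simp only [List.foldl_cons]
        rw [hrec.2, hin.2]
        have hbt : pvBacktrack (rows : Int) (length :: rest) p.1
            = (((PySem.List.pyRange 0 (p.1.length : Int) 1).filter
                  (fun i => decide (length ≤ PySem.List.pyGetD p.1 i 0))).map
                (fun i => pvBacktrack (rows : Int) rest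
                  (p.1.set i.toNat (PySem.List.pyGetD p.1 i 0 - length)))).sum := by
          show (PySem.List.pyRange 0 (rows : Int) 1).foldl _ 0 = _
          rw [hp] at *
          rw [pv_foldl_if_sum (PySem.List.pyRange 0 (rows : Int) 1)
            (fun i => length ≤ PySem.List.pyGetD p.1 i 0)
            (fun i => pvBacktrack (rows : Int) rest
              (p.1.set i.toNat (PySem.List.pyGetD p.1 i 0 - length))) 0]
          simp
        simp only [pvW, List.map_cons, List.sum_cons]
        rw [hbt]
        ring
  have h0 : pvInv rows (PySem.Dict.empty : PySem.Dict (List Int) Int) := by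
    refine ⟨PySem.Dict.nodup_keys_empty, ?_⟩
    intro p hp
    rw [pv_items_empty] at hp
    simp at hp
  have hk := key_main d.items hInv.2 PySem.Dict.empty h0
  refine ⟨hk.1, ?_⟩
  rw [hk.2, pv_items_empty]
  simp [pvW]

-- all-zero key of the right length is exactly the replicate-zeros key
lemma pv_all_zero_iff (l : List Int) (n : Nat) (h : l.length = n) :
    (l.all (fun r => r == 0) = true) ↔ l = List.replicate n 0 := by
  subst h
  constructor
  · intro hz
    apply List.ext_getElem (by simp)
    intro i h1 h2
    simp only [List.all_eq_true, beq_iff_eq] at hz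
    simp [hz _ (l.getElem_mem h1)]
  · intro hz
    rw [hz]
    simp

-- with unique keys, the 0/1-weighted sum picks out the value stored at z
lemma pv_sum_pick (L : List (List Int × Int)) (z : List Int) (w : Int)
    (hnd : (L.map Prod.fst).Nodup) (hm : (z, w) ∈ L) :
    (L.map (fun p => if p.1 = z then p.2 else 0)).sum = w := by
  induction L with
  | nil => simp at hm
  | cons p L ih =>
      simp only [List.map_cons, List.nodup_cons, List.mem_map] at hnd
      rcases List.mem_cons.mp hm with h | h
      · obtain rfl : p = (z, w) := h.symm
        have hrest : ∀ q ∈ L, ¬ q.1 = z := by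
          intro q hq hq'
          exact hnd.1 ⟨q, hq, hq'⟩
        have hLz : L.map (fun p => if p.1 = z then p.2 else 0) = L.map (fun _ => 0) :=
          List.map_congr_left (fun q hq => by simp [hrest q hq])
        simp [hLz]
      · have hp : ¬ p.1 = z := by
          intro hq'
          exact hnd.1 ⟨(z, w), h, by simp [hq']⟩
        simp only [List.map_cons, if_neg hp, List.sum_cons, zero_add]
        exact ih hnd.2 h

-- with unique keys of length rows, the weighted sum at level [] is the lookup of the zero key
lemma pv_W_nil_getD (rows : Nat) (d : PySem.Dict (List Int) Int) (hInv : pvInv rows d) :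
    pvW (pvBacktrack (rows : Int) []) d.items = d.getD (List.replicate rows (0 : Int)) 0 := by
  have hz : ∀ p ∈ d.items,
      pvBacktrack (rows : Int) [] p.1 = if p.1 = List.replicate rows (0 : Int) then 1 else 0 := by
    intro p hp
    show (if p.1.all (fun r => r == 0) then 1 else 0) = _
    by_cases h : p.1 = List.replicate rows (0 : Int)
    · rw [if_pos ((pv_all_zero_iff p.1 rows (hInv.2 p hp)).mpr h), if_pos h]
    · rw [if_neg h, if_neg (fun hh => h ((pv_all_zero_iff p.1 rows (hInv.2 p hp)).mp hh))]
  have hW : pvW (pvBacktrack (rows : Int) []) d.items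
      = (d.items.map (fun p => if p.1 = List.replicate rows (0 : Int) then p.2 else 0)).sum := by
    unfold pvW
    refine congrArg List.sum (List.map_congr_left ?_)
    intro p hp
    rw [hz p hp]
    by_cases h : p.1 = List.replicate rows (0 : Int) <;> simp [h]
  rw [hW]
  have hnd : (d.items.map Prod.fst).Nodup := by simpa only [PySem.Dict.keys] using hInv.1
  by_cases h : d.contains (List.replicate rows (0 : Int)) = true
  · have hs : (d.get? (List.replicate rows (0 : Int))).isSome := by
      rw [← PySem.Dict.contains_eq_isSome_get?]; exact h
    obtain ⟨w, hw⟩ := Option.isSome_iff_exists.mp hs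
    rw [PySem.Dict.getD_of_get?_eq_some _ _ hw]
    exact pv_sum_pick d.items _ w hnd (PySem.Dict.mem_items_of_get?_eq_some _ hw)
  · have h' : d.contains (List.replicate rows (0 : Int)) = false := by simpa using h
    rw [PySem.Dict.getD_of_not_contains _ _ h']
    have hnot : ∀ p ∈ d.items, ¬ p.1 = List.replicate rows (0 : Int) := by
      intro p hp hq
      have hk : p.1 ∈ d.keys := PySem.Dict.mem_keys_of_mem_items _ hp
      rw [hq] at hk
      rw [PySem.Dict.contains_eq_decide_mem_keys] at h'
      simp [hk] at h'
    have hLz : (d.items.map (fun p => if p.1 = List.replicate rows (0 : Int) then p.2 else 0))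
        = d.items.map (fun _ => 0) :=
      List.map_congr_left (fun q hq => by simp [hnot q hq])
    simp [hLz]

-- the whole outer loop of B
lemma pv_main_loop (rows : Nat) (cls : List Int) (d : PySem.Dict (List Int) Int)
    (hInv : pvInv rows d) :
    (cls.foldl (fun states length => pvStep length states) d).getD
        (List.replicate rows (0 : Int)) 0
      = pvW (pvBacktrack (rows : Int) cls) d.items := by
  induction cls generalizing d with
  | nil => exact (pv_W_nil_getD rows d hInv).symm
  | cons l cls ih =>
      have hs := pv_step_W l rows cls d hInv
      simp only [List.foldl_cons]
      rw [ih _ hs.1, hs.2]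

-- ===== VERDICT (by name: the statement is the Claim_ definition above) =====
theorem character_M_spec : Claim_equal_character_M := by
  intro partition cycle_lengths _
  show character_M partition cycle_lengths = character_M_alt partition cycle_lengths
  unfold character_M character_M_alt
  have h0 : pvInv partition.length
      ((PySem.Dict.empty : PySem.Dict (List Int) Int).insert partition 1) := by
    constructor
    · exact PySem.Dict.nodup_keys_insert _ _ _ (PySem.Dict.nodup_keys_empty)
    · intro p hp
      rcases (PySem.Dict.mem_items_insert _ _ _ _).mp hp with h | h
      · rw [h]
      · rcases h with ⟨h1, -⟩
        rw [pv_items_empty] at h1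
        simp at h1
  rw [pv_main_loop partition.length cycle_lengths _ h0]
  have : ((PySem.Dict.empty : PySem.Dict (List Int) Int).insert partition 1).items
      = [(partition, 1)] := by
    rw [PySem.Dict.items_insert_of_not_contains _ _ (PySem.Dict.contains_empty partition),
        pv_items_empty]
    rfl
  rw [this]
  simp [pvW]
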